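-- pv_equiv track=rewrite | github.com/tsenturion/inueco | mytest/tournament_analyzis.py | rank_teams_advanced
-- ===== SOURCE A (Python) =====
-- from typing import List, Dict, Tuple, Optional, Any
--
-- def rank_teams_advanced(team_stats: Dict[str, Dict[str, Any]],
--                        tiebreaker_order: List[str] = ['points', 'goal_diff', 'goals_for']) -> List[Tuple[int, str, int, int]]:
--     if not team_stats:
--         return []
--
--     teams_list = [(team, stats) for team, stats in team_stats.items()]
--
--     for criterion in reversed(tiebreaker_order):
--         reverse = True
--         if criterion == "points":
--             teams_list.sort(key=lambda x: x[1]["points"], reverse=reverse)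
--         elif criterion == "goal_diff":
--             teams_list.sort(key=lambda x: x[1]["goal_diff"], reverse=reverse)
--         elif criterion == "goals_for":
--             teams_list.sort(key=lambda x: x[1]["goals_for"], reverse=reverse)
--         elif criterion == "wins":
--             teams_list.sort(key=lambda x: x[1]["wins"], reverse=reverse)
--
--     result = []
--     current_rank = 1
--     previous_stats = None
--
--     for i, (team, stats) in enumerate(teams_list):
--         current_stats = tuple(stats[criterion] for criterion in tiebreaker_order)
--
--         if i == 0:
--             result.append((current_rank, team, stats["points"], stats["goal_diff"]))
--         else:
--             if current_stats == previous_stats: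
--                 result.append((current_rank, team, stats["points"], stats["goal_diff"]))
--             else:
--                 current_rank = i + 1
--                 result.append((current_rank, team, stats["points"], stats["goal_diff"]))
--
--         previous_stats = current_stats
--
--     return result
-- ===== SOURCE B (Python) =====
-- from typing import List, Dict, Tuple, Any
--
-- def rank_teams_advanced(team_stats: Dict[str, Dict[str, Any]],
--                        tiebreaker_order: List[str] = ['points', 'goal_diff', 'goals_for']) -> List[Tuple[int, str, int, int]]:
--     recognized = ('points', 'goal_diff', 'goals_for', 'wins')
--     keys = [c for c in tiebreaker_order if c in recognized]
--     teams_list = sorted(team_stats.items(),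
--                         key=lambda item: [-item[1][c] for c in keys])
--     result = []
--     rank = 1
--     previous = None
--     for i, (team, stats) in enumerate(teams_list):
--         current = tuple(stats[c] for c in tiebreaker_order)
--         if current != previous:
--             rank = i + 1
--         result.append((rank, team, stats["points"], stats["goal_diff"]))
--         previous = current
--     return result
-- ===== Notes on version B (the rewrite author's own statement) =====
-- stated objective: simpler
-- what changed: A's cascade of k successive reverse stable sorts (one per recognized criterion) is replaced by a single stable sort on a composite negated-key list, and A's three-branch rank loop by one conditional rank update.
import Mathlib
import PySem

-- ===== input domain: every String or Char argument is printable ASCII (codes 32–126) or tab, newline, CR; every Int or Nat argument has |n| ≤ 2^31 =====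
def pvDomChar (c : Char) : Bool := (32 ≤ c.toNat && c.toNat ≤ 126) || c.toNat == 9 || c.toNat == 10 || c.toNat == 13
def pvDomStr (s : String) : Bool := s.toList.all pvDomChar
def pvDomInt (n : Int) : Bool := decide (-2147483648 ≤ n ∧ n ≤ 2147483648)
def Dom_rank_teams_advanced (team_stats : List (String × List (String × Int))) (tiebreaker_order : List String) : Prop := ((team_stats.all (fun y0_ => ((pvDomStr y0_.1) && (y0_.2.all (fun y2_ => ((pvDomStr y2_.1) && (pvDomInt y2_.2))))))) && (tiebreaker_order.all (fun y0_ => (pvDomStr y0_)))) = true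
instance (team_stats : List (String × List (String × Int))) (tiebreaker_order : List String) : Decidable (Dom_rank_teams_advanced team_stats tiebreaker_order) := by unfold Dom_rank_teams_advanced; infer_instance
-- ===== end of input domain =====

-- B replaces A's cascade of k reverse stable sorts (one per recognized criterion) by ONE
-- stable sort on a composite negated-key list, and A's three-branch rank loop by a single
-- conditional rank update; same return value on all inputs where A returns.

-- stats[c]; under Pre_ the looked-up key is always present, so the default 0 is never
-- the value used (Python raises KeyError exactly on the inputs Pre_ excludes)
def pvStat (s : List (String × Int)) (c : String) : Int := (PySem.Dict.ofList s).getD c 0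

-- ===== PORT A =====
-- one iteration of A's 'for criterion in reversed(tiebreaker_order)' sorting loop
def pvSortPass (lst : List (String × List (String × Int))) (c : String) : List (String × List (String × Int)) :=
  if c == "points" then PySem.List.sorted lst (fun x => pvStat x.2 "points") true
  else if c == "goal_diff" then PySem.List.sorted lst (fun x => pvStat x.2 "goal_diff") true
  else if c == "goals_for" then PySem.List.sorted lst (fun x => pvStat x.2 "goals_for") true
  else if c == "wins" then PySem.List.sorted lst (fun x => pvStat x.2 "wins") true
  else lst

-- one iteration of A's rank loop; state = (result, current_rank, previous_stats)
def pvRankStepA (order : List String)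
    (st : List (Int × String × Int × Int) × Int × Option (List Int))
    (xi : (String × List (String × Int)) × Nat) :
    List (Int × String × Int × Int) × Int × Option (List Int) :=
  let cur := order.map (fun c => pvStat xi.1.2 c)
  if xi.2 == 0 then
    (st.1 ++ [(st.2.1, xi.1.1, pvStat xi.1.2 "points", pvStat xi.1.2 "goal_diff")], st.2.1, some cur)
  else if (some cur : Option (List Int)) == st.2.2 then
    (st.1 ++ [(st.2.1, xi.1.1, pvStat xi.1.2 "points", pvStat xi.1.2 "goal_diff")], st.2.1, some cur)
  else
    (st.1 ++ [((xi.2 : Int) + 1, xi.1.1, pvStat xi.1.2 "points", pvStat xi.1.2 "goal_diff")], (xi.2 : Int) + 1, some cur)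

def rank_teams_advanced (team_stats : List (String × List (String × Int))) (tiebreaker_order : List String) : List (Int × String × Int × Int) :=
  if team_stats.isEmpty then []
  else
    let teams_list := (PySem.Dict.ofList team_stats).items
    let sorted_list := tiebreaker_order.reverse.foldl pvSortPass teams_list
    (sorted_list.zipIdx.foldl (pvRankStepA tiebreaker_order) ([], 1, none)).1

-- ===== PORT B =====
-- 'c in recognized'
def pvRecognized (c : String) : Bool :=
  c == "points" || c == "goal_diff" || c == "goals_for" || c == "wins"

-- one iteration of B's rank loop; state = (result, rank, previous)
def pvRankStepB (order : List String)
    (st : List (Int × String × Int × Int) × Int × Option (List Int))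
    (xi : (String × List (String × Int)) × Nat) :
    List (Int × String × Int × Int) × Int × Option (List Int) :=
  let cur := order.map (fun c => pvStat xi.1.2 c)
  let rank := if (some cur : Option (List Int)) == st.2.2 then st.2.1 else (xi.2 : Int) + 1
  (st.1 ++ [(rank, xi.1.1, pvStat xi.1.2 "points", pvStat xi.1.2 "goal_diff")], rank, some cur)

def rank_teams_advanced_alt (team_stats : List (String × List (String × Int))) (tiebreaker_order : List String) : List (Int × String × Int × Int) :=
  let keys := tiebreaker_order.filter pvRecognized
  let teams_list := PySem.List.sorted (PySem.Dict.ofList team_stats).items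
      (fun it => keys.map (fun c => -(pvStat it.2 c))) false
  (teams_list.zipIdx.foldl (pvRankStepB tiebreaker_order) ([], 1, none)).1

-- ===== PRECONDITION & SPEC =====
-- Pre_ excludes exactly the inputs where Python A raises KeyError: some kept team's stats
-- dict is missing a criterion named in tiebreaker_order, or missing "points"/"goal_diff".
def Pre_rank_teams_advanced (team_stats : List (String × List (String × Int))) (tiebreaker_order : List String) : Prop :=
  ∀ p ∈ (PySem.Dict.ofList team_stats).items,
    (∀ c ∈ tiebreaker_order, (PySem.Dict.ofList p.2).contains c = true) ∧
    (PySem.Dict.ofList p.2).contains "points" = true ∧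
    (PySem.Dict.ofList p.2).contains "goal_diff" = true
instance (team_stats : List (String × List (String × Int))) (tiebreaker_order : List String) : Decidable (Pre_rank_teams_advanced team_stats tiebreaker_order) := by unfold Pre_rank_teams_advanced; infer_instance

def pvWitness_rank_teams_advanced : (List (String × List (String × Int))) × List String :=
  ([("ajax", [("points", 3), ("goal_diff", 1)]), ("betis", [("points", 3), ("goal_diff", 1)]), ("celta", [("points", 5), ("goal_diff", -2)])], ["points", "goal_diff"])

def Spec_rank_teams_advanced (team_stats : List (String × List (String × Int))) (tiebreaker_order : List String) (out : List (Int × String × Int × Int)) : Prop := out = rank_teams_advanced_alt team_stats tiebreaker_order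
instance (team_stats : List (String × List (String × Int))) (tiebreaker_order : List String) (out : List (Int × String × Int × Int)) : Decidable (Spec_rank_teams_advanced team_stats tiebreaker_order out) := by unfold Spec_rank_teams_advanced; infer_instance

-- ===== CLAIM (what is proved, stated in full; the proofs are below) =====
def Claim_equal_rank_teams_advanced : Prop := ∀ (team_stats : List (String × List (String × Int))) (tiebreaker_order : List String), Dom_rank_teams_advanced team_stats tiebreaker_order → Pre_rank_teams_advanced team_stats tiebreaker_order → Spec_rank_teams_advanced team_stats tiebreaker_order (rank_teams_advanced team_stats tiebreaker_order)

-- ===== LEMMAS AND PROOFS =====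

-- B's composite sort key
def pvCombo (order : List String) (x : String × List (String × Int)) : List Int :=
  (order.filter pvRecognized).map (fun c => -(pvStat x.2 c))

-- generic facts about stable insertion (PySem.List.insertBy) w.r.t. an abstract strict 'before'
theorem pv_pairwise_insertBy {α : Type} (before : α → α → Bool) (x : α) (acc : List α)
    (htr : ∀ a b c, before a b = true → before c b = false → before a c = true)
    (hasym : ∀ a b, before a b = true → before b a = false)
    (hacc : acc.Pairwise (fun a b => before b a = false)) :
    (PySem.List.insertBy before x acc).Pairwise (fun a b => before b a = false) := by
  induction acc with
  | nil => simp [PySem.List.insertBy]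
  | cons y ys ih =>
    rw [List.pairwise_cons] at hacc
    obtain ⟨hy, hys⟩ := hacc
    rw [PySem.List.insertBy]
    by_cases hxy : before x y = true
    · rw [if_pos hxy]
      refine List.Pairwise.cons ?_ (List.Pairwise.cons hy hys)
      intro z hz
      rcases List.mem_cons.mp hz with rfl | hz
      · exact hasym _ _ hxy
      · exact hasym _ _ (htr _ _ _ hxy (hy z hz))
    · rw [if_neg hxy]
      refine List.Pairwise.cons ?_ (ih hys)
      intro z hz
      rcases (PySem.List.insertBy_mem_iff before x z ys).mp hz with rfl | hz
      · exact Bool.eq_false_iff.mpr hxy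
      · exact hy z hz

theorem pv_filter_insertBy {α : Type} (before : α → α → Bool) (p : α → Bool) (x : α) (acc : List α)
    (htr : ∀ a b c, before a b = true → before c b = false → before a c = true)
    (hacc : acc.Pairwise (fun a b => before b a = false))
    (hp : ∀ y ∈ acc, p x = true → p y = true → before x y = false) :
    (PySem.List.insertBy before x acc).filter p = acc.filter p ++ (if p x then [x] else []) := by
  induction acc with
  | nil => by_cases h : p x = true <;> simp [PySem.List.insertBy, List.filter, h]
  | cons y ys ih =>
    rw [List.pairwise_cons] at hacc
    obtain ⟨hy, hys⟩ := hacc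
    rw [PySem.List.insertBy]
    by_cases hxy : before x y = true
    · rw [if_pos hxy]
      by_cases hpx : p x = true
      · have hall : ∀ z ∈ y :: ys, p z = false := by
          intro z hz
          by_contra hne
          have hpz : p z = true := by revert hne; cases p z <;> simp
          rcases List.mem_cons.mp hz with rfl | hz'
          · exact absurd (hp z (List.mem_cons_self) hpx hpz) (by simp [hxy])
          · have := htr _ _ _ hxy (hy z hz')
            exact absurd (hp z (List.mem_cons_of_mem _ hz') hpx hpz) (by simp [this])
        have h1 : (y :: ys).filter p = [] := List.filter_eq_nil_iff.mpr (by
          intro a ha; simp [hall a ha])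
        rw [List.filter_cons_of_pos hpx, h1, if_pos hpx]
        simp
      · have hpx' : p x = false := by revert hpx; cases p x <;> simp
        simp [List.filter, hpx']
    · rw [if_neg hxy]
      have ih' := ih hys (fun y hy' => hp y (List.mem_cons_of_mem _ hy'))
      cases hpy : p y <;> simp [List.filter, hpy, ih']

theorem pv_foldl_pairwise {α : Type} (before : α → α → Bool)
    (htr : ∀ a b c, before a b = true → before c b = false → before a c = true)
    (hasym : ∀ a b, before a b = true → before b a = false) :
    ∀ (xs acc : List α), acc.Pairwise (fun a b => before b a = false) →
      (xs.foldl (fun a x => PySem.List.insertBy before x a) acc).Pairwise (fun a b => before b a = false) := by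
  intro xs
  induction xs with
  | nil => intro acc h; simpa using h
  | cons x t ih =>
    intro acc h
    simpa using ih _ (pv_pairwise_insertBy before x acc htr hasym h)

theorem pv_foldl_filter {α : Type} (before : α → α → Bool) (p : α → Bool)
    (htr : ∀ a b c, before a b = true → before c b = false → before a c = true)
    (hasym : ∀ a b, before a b = true → before b a = false)
    (hp : ∀ a b, p a = true → p b = true → before a b = false) :
    ∀ (xs acc : List α), acc.Pairwise (fun a b => before b a = false) →
      (xs.foldl (fun a x => PySem.List.insertBy before x a) acc).filter p = acc.filter p ++ xs.filter p := by
  intro xs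
  induction xs with
  | nil => intro acc h; simp
  | cons x t ih =>
    intro acc h
    have h2 := pv_pairwise_insertBy before x acc htr hasym h
    have hf := pv_filter_insertBy before p x acc htr h (fun y _ ha hb => hp x y ha hb)
    simp only [List.foldl_cons]
    rw [ih _ h2, hf]
    cases hpx : p x <;> simp [List.filter, hpx]

-- a stable sort (either direction) leaves any set of mutually-tied elements in place
theorem pv_sorted_filter {α κ : Type} [LT κ] [DecidableLT κ] (key : α → κ) (p : α → Bool)
    (hlt1 : ∀ a b c : κ, a < b → ¬ c < b → a < c)
    (hlt2 : ∀ a b c : κ, b < a → ¬ b < c → c < a)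
    (hasym : ∀ a b : κ, a < b → ¬ b < a)
    (hirr : ∀ a : κ, ¬ a < a)
    (hp : ∀ a b, p a = true → p b = true → key a = key b) (xs : List α) (rev : Bool) :
    (PySem.List.sorted xs key rev).filter p = xs.filter p := by
  cases rev
  · rw [PySem.List.sorted_eq_foldl_insertBy]
    have := pv_foldl_filter (fun a b => decide (key a < key b)) p
      (by intro a b c h1 h2
          simp only [decide_eq_true_eq, decide_eq_false_iff_not] at *
          exact hlt1 _ _ _ h1 h2)
      (by intro a b h1
          simp only [decide_eq_true_eq, decide_eq_false_iff_not] at *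
          exact hasym _ _ h1)
      (by intro a b h1 h2
          simp only [decide_eq_false_iff_not]
          rw [hp a b h1 h2]; exact hirr _)
      xs [] (by simp)
    simpa using this
  · rw [PySem.List.sorted_rev_eq_foldl_insertBy]
    have := pv_foldl_filter (fun a b => decide (key b < key a)) p
      (by intro a b c h1 h2
          simp only [decide_eq_true_eq, decide_eq_false_iff_not] at *
          exact hlt2 _ _ _ h1 h2)
      (by intro a b h1
          simp only [decide_eq_true_eq, decide_eq_false_iff_not] at *
          exact hasym _ _ h1)
      (by intro a b h1 h2
          simp only [decide_eq_false_iff_not]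
          rw [hp a b h1 h2]; exact hirr _)
      xs [] (by simp)
    simpa using this

-- the lexicographic order on List Int used by B's composite key
theorem pvL_lt1 (a b c : List Int) (h1 : a < b) (h2 : ¬ c < b) : a < c :=
  Std.lt_of_lt_of_le h1 (Std.not_lt.mp h2)
theorem pvL_lt2 (a b c : List Int) (h1 : b < a) (h2 : ¬ b < c) : c < a :=
  Std.lt_of_le_of_lt (Std.not_lt.mp h2) h1
theorem pvL_asym (a b : List Int) (h : a < b) : ¬ b < a :=
  fun h2 => absurd (List.lt_trans h h2) (List.lt_irrefl _)
theorem pv_cons_lt {a b : Int} {l m : List Int} : (a :: l) < (b :: m) ↔ a < b ∨ (a = b ∧ l < m) :=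
  List.cons_lt_cons_iff

-- uniqueness: two key-sorted lists with identical per-key filters are equal
theorem pv_sorted_unique {α : Type} (key : α → List Int) :
    ∀ (m1 m2 : List α), m1.Pairwise (fun a b => ¬ key b < key a) →
      m2.Pairwise (fun a b => ¬ key b < key a) →
      (∀ k : List Int, m1.filter (fun x => decide (key x = k)) = m2.filter (fun x => decide (key x = k))) →
      m1 = m2 := by
  intro m1
  induction m1 with
  | nil =>
    intro m2 _ _ hf
    cases m2 with
    | nil => rfl
    | cons z t2 =>
      have := hf (key z)
      simp [List.filter] at this
  | cons y t1 ih =>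
    intro m2 h1 h2 hf
    rw [List.pairwise_cons] at h1
    obtain ⟨hy1, ht1⟩ := h1
    cases m2 with
    | nil =>
      have := hf (key y)
      simp [List.filter] at this
    | cons z t2 =>
      rw [List.pairwise_cons] at h2
      obtain ⟨hz2, ht2⟩ := h2
      have hyz : y = z := by
        by_cases hkey : key z = key y
        · have := hf (key y)
          simp only [List.filter_cons, decide_eq_true_eq, hkey] at this
          rw [if_pos (by simp)] at this
          exact (List.cons.injEq _ _ _ _ ▸ this).1
        · exfalso
          have hyf := hf (key y)
          rw [List.filter_cons_of_pos (by simp), List.filter_cons_of_neg (by simpa using hkey)] at hyf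
          have hy_t2 : y ∈ t2 := by
            have : y ∈ List.filter (fun x => decide (key x = key y)) t2 := by
              rw [← hyf]; exact List.mem_cons_self
            exact List.mem_of_mem_filter this
          have hnzy : ¬ key y < key z := hz2 y hy_t2
          have hzf := hf (key z)
          rw [List.filter_cons_of_neg (by simpa using fun h => hkey h.symm),
              List.filter_cons_of_pos (by simp)] at hzf
          have hz_t1 : z ∈ t1 := by
            have : z ∈ List.filter (fun x => decide (key x = key z)) t1 := by
              rw [hzf]; exact List.mem_cons_self
            exact List.mem_of_mem_filter this
          have hnyz : ¬ key z < key y := hy1 z hz_t1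
          exact hkey (List.le_antisymm hnzy hnyz)
      subst hyz
      have htf : ∀ k : List Int, t1.filter (fun x => decide (key x = k)) = t2.filter (fun x => decide (key x = k)) := by
        intro k
        have := hf k
        by_cases hk : key y = k
        · rw [List.filter_cons_of_pos (by simpa using hk), List.filter_cons_of_pos (by simpa using hk)] at this
          exact (List.cons.injEq _ _ _ _ ▸ this).2
        · rwa [List.filter_cons_of_neg (by simpa using hk), List.filter_cons_of_neg (by simpa using hk)] at this
      exact congrArg (y :: ·) (ih t2 ht1 ht2 htf)

-- stability within ties: reverse stable sort by k1 of a kv-sorted list is (-k1)::kv-sorted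
theorem pv_ins_rev {α : Type} (k1 : α → Int) (kv : α → List Int) (x : α) (acc : List α)
    (hkv : ∀ y ∈ acc, ¬ kv x < kv y)
    (hacc : acc.Pairwise (fun a b => ¬ ((-(k1 b) :: kv b) < (-(k1 a) :: kv a)))) :
    (PySem.List.insertBy (fun a b => decide (k1 b < k1 a)) x acc).Pairwise
      (fun a b => ¬ ((-(k1 b) :: kv b) < (-(k1 a) :: kv a))) := by
  induction acc with
  | nil => simp [PySem.List.insertBy]
  | cons y ys ih =>
    rw [List.pairwise_cons] at hacc
    obtain ⟨hy, hys⟩ := hacc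
    rw [PySem.List.insertBy]
    by_cases hxy : k1 y < k1 x
    · rw [if_pos (by simpa using hxy)]
      refine List.Pairwise.cons ?_ (List.Pairwise.cons hy hys)
      intro z hz
      have hxz : (-(k1 x) :: kv x) < (-(k1 z) :: kv z) := by
        rcases List.mem_cons.mp hz with rfl | hz'
        · exact pv_cons_lt.mpr (Or.inl (by omega))
        · have h1 : (-(k1 x) :: kv x) < (-(k1 y) :: kv y) := pv_cons_lt.mpr (Or.inl (by omega))
          rcases lt_trichotomy (-(k1 y) :: kv y) (-(k1 z) :: kv z) with h | h | h
          · exact List.lt_trans h1 h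
          · exact h ▸ h1
          · exact absurd h (hy z hz')
      intro hlt
      exact absurd (List.lt_trans hxz hlt) (List.lt_irrefl _)
    · rw [if_neg (by simpa using hxy)]
      refine List.Pairwise.cons ?_ (ih (fun y' hy' => hkv y' (List.mem_cons_of_mem _ hy')) hys)
      intro z hz
      rcases (PySem.List.insertBy_mem_iff _ x z ys).mp hz with rfl | hz'
      · intro hlt
        rcases pv_cons_lt.mp hlt with h | ⟨h, h2⟩
        · omega
        · exact absurd h2 (hkv y List.mem_cons_self)
      · exact hy z hz'

theorem pv_fold_rev {α : Type} (k1 : α → Int) (kv : α → List Int) :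
    ∀ (L acc : List α), L.Pairwise (fun a b => ¬ kv b < kv a) →
      (∀ y ∈ acc, ∀ x ∈ L, ¬ kv x < kv y) →
      acc.Pairwise (fun a b => ¬ ((-(k1 b) :: kv b) < (-(k1 a) :: kv a))) →
      (L.foldl (fun a x => PySem.List.insertBy (fun a b => decide (k1 b < k1 a)) x a) acc).Pairwise
        (fun a b => ¬ ((-(k1 b) :: kv b) < (-(k1 a) :: kv a))) := by
  intro L
  induction L with
  | nil => intro acc _ _ h; simpa using h
  | cons x t ih =>
    intro acc hL hmix hacc
    rw [List.pairwise_cons] at hL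
    obtain ⟨hx, ht⟩ := hL
    simp only [List.foldl_cons]
    apply ih _ ht
    · intro y hy z hz
      rcases (PySem.List.insertBy_mem_iff _ x y acc).mp hy with rfl | hy'
      · exact hx z hz
      · exact hmix y hy' z (List.mem_cons_of_mem _ hz)
    · exact pv_ins_rev k1 kv x acc (fun y hy => hmix y hy x List.mem_cons_self) hacc

-- any stable-sorted-by-kv list is kv-monotone
theorem pv_sorted_kv_pairwise {α : Type} (kv : α → List Int) (xs : List α) :
    (PySem.List.sorted xs kv false).Pairwise (fun a b => ¬ kv b < kv a) := by
  rw [PySem.List.sorted_eq_foldl_insertBy]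
  have := pv_foldl_pairwise (fun a b => decide (kv a < kv b))
    (by intro a b c h1 h2
        simp only [decide_eq_true_eq, decide_eq_false_iff_not] at *
        exact pvL_lt1 _ _ _ h1 h2)
    (by intro a b h1
        simp only [decide_eq_true_eq, decide_eq_false_iff_not] at *
        exact pvL_asym _ _ h1)
    xs [] (by simp)
  exact this.imp (by intro a b h; simpa using h)

-- the composition law: reverse stable sort by k1 after stable sort by kv = one sort by (-k1)::kv
theorem pv_comp {α : Type} (k1 : α → Int) (kv : α → List Int) (xs : List α) :
    PySem.List.sorted (PySem.List.sorted xs kv false) k1 true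
      = PySem.List.sorted xs (fun x => -(k1 x) :: kv x) false := by
  apply pv_sorted_unique (fun x => -(k1 x) :: kv x)
  · rw [PySem.List.sorted_rev_eq_foldl_insertBy]
    exact pv_fold_rev k1 kv _ [] (pv_sorted_kv_pairwise kv xs) (by simp) (by simp)
  · rw [PySem.List.sorted_eq_foldl_insertBy]
    have := pv_foldl_pairwise (fun a b => decide ((-(k1 a) :: kv a) < (-(k1 b) :: kv b)))
      (by intro a b c h1 h2
          simp only [decide_eq_true_eq, decide_eq_false_iff_not] at *
          exact pvL_lt1 _ _ _ h1 h2)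
      (by intro a b h1
          simp only [decide_eq_true_eq, decide_eq_false_iff_not] at *
          exact pvL_asym _ _ h1)
      xs [] (by simp)
    exact this.imp (by intro a b h; simpa using h)
  · intro k
    have h1 : (PySem.List.sorted (PySem.List.sorted xs kv false) k1 true).filter
        (fun x => decide ((-(k1 x) :: kv x) = k)) = (PySem.List.sorted xs kv false).filter
        (fun x => decide ((-(k1 x) :: kv x) = k)) := by
      apply pv_sorted_filter k1 _ (by omega) (by omega) (by omega) (by omega)
      intro a b ha hb
      simp only [decide_eq_true_eq] at ha hb
      have h := ha.trans hb.symm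
      have := (List.cons.injEq _ _ _ _ ▸ h).1
      omega
    have h2 : (PySem.List.sorted xs kv false).filter
        (fun x => decide ((-(k1 x) :: kv x) = k)) = xs.filter
        (fun x => decide ((-(k1 x) :: kv x) = k)) := by
      apply pv_sorted_filter kv _ pvL_lt1 pvL_lt2 pvL_asym List.lt_irrefl
      intro a b ha hb
      simp only [decide_eq_true_eq] at ha hb
      have h := ha.trans hb.symm
      exact (List.cons.injEq _ _ _ _ ▸ h).2
    have h3 : (PySem.List.sorted xs (fun x => -(k1 x) :: kv x) false).filter
        (fun x => decide ((-(k1 x) :: kv x) = k)) = xs.filter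
        (fun x => decide ((-(k1 x) :: kv x) = k)) := by
      apply pv_sorted_filter (fun x => -(k1 x) :: kv x) _ pvL_lt1 pvL_lt2 pvL_asym List.lt_irrefl
      intro a b ha hb
      simp only [decide_eq_true_eq] at ha hb
      exact ha.trans hb.symm
    rw [h1, h2, h3]

theorem pv_sorted_const_nil {α : Type} (xs : List α) :
    PySem.List.sorted xs (fun _ => ([] : List Int)) false = xs := by
  rw [PySem.List.sorted_eq_foldl_insertBy]
  have aux : ∀ (ys acc : List α),
      (ys.foldl (fun acc x => PySem.List.insertBy (fun a b => decide (([]:List Int) < ([]:List Int))) x acc) acc) = acc ++ ys := by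
    intro ys
    induction ys with
    | nil => intro acc; simp
    | cons x t ih =>
      intro acc
      simp only [List.foldl_cons]
      rw [PySem.List.insertBy_of_forall_not_before _ _ _ (by
        intro y _
        simp only [decide_eq_false_iff_not]
        exact List.lt_irrefl _), ih]
      simp
  simpa using aux xs []

-- A's cascade of reverse sorts equals B's single composite sort
theorem pv_phases (order : List String) (xs : List (String × List (String × Int))) :
    order.reverse.foldl pvSortPass xs = PySem.List.sorted xs (pvCombo order) false := by
  induction order generalizing xs with
  | nil =>
    have h : pvCombo [] = fun _ => ([] : List Int) := rfl
    rw [h, pv_sorted_const_nil]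
    rfl
  | cons c rest ih =>
    rw [List.reverse_cons, List.foldl_append, ih]
    simp only [List.foldl_cons, List.foldl_nil]
    unfold pvSortPass
    by_cases h1 : c == "points"
    · have hc : c = "points" := by simpa using h1
      subst hc
      rw [if_pos (by rfl)]
      have hkey : pvCombo ("points" :: rest) = fun x => -(pvStat x.2 "points") :: pvCombo rest x := by
        funext x; simp [pvCombo, pvRecognized]
      rw [hkey]
      exact pv_comp _ _ _
    · rw [if_neg h1]
      by_cases h2 : c == "goal_diff"
      · have hc : c = "goal_diff" := by simpa using h2
        subst hc
        rw [if_pos (by rfl)]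
        have hkey : pvCombo ("goal_diff" :: rest) = fun x => -(pvStat x.2 "goal_diff") :: pvCombo rest x := by
          funext x; simp [pvCombo, pvRecognized]
        rw [hkey]
        exact pv_comp _ _ _
      · rw [if_neg h2]
        by_cases h3 : c == "goals_for"
        · have hc : c = "goals_for" := by simpa using h3
          subst hc
          rw [if_pos (by rfl)]
          have hkey : pvCombo ("goals_for" :: rest) = fun x => -(pvStat x.2 "goals_for") :: pvCombo rest x := by
            funext x; simp [pvCombo, pvRecognized]
          rw [hkey]
          exact pv_comp _ _ _
        · rw [if_neg h3]
          by_cases h4 : c == "wins"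
          · have hc : c = "wins" := by simpa using h4
            subst hc
            rw [if_pos (by rfl)]
            have hkey : pvCombo ("wins" :: rest) = fun x => -(pvStat x.2 "wins") :: pvCombo rest x := by
              funext x; simp [pvCombo, pvRecognized]
            rw [hkey]
            exact pv_comp _ _ _
          · rw [if_neg h4]
            have hkey : pvCombo (c :: rest) = pvCombo rest := by
              funext x
              simp only [pvCombo, List.filter_cons]
              rw [if_neg (by simp [pvRecognized, h1, h2, h3, h4])]
            rw [hkey]

-- the two rank loops agree
theorem pv_rank_loops (order : List String) (L : List (String × List (String × Int))) :
    (L.zipIdx.foldl (pvRankStepA order) ([], 1, none)).1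
      = (L.zipIdx.foldl (pvRankStepB order) ([], 1, none)).1 := by
  cases L with
  | nil => rfl
  | cons x t =>
    rw [List.zipIdx_cons, List.foldl_cons, List.foldl_cons]
    have hfirst : pvRankStepA order ([], 1, none) (x, 0) = pvRankStepB order ([], 1, none) (x, 0) := by
      simp [pvRankStepA, pvRankStepB]
    rw [hfirst]
    congr 1
    apply PySem.List.foldl_congr_mem
    intro acc xi hxi
    have h1 : 1 ≤ xi.2 := List.le_snd_of_mem_zipIdx hxi
    have h0 : (xi.2 == 0) = false := by simpa using (by omega : xi.2 ≠ 0)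
    simp only [pvRankStepA, pvRankStepB, h0, Bool.false_eq_true, if_false]
    by_cases he : (some (order.map (fun c => pvStat xi.1.2 c)) : Option (List Int)) == acc.2.2
    · simp [he]
    · simp [he]

-- ===== VERDICT (by name: the statement is the Claim_ definition above) =====
theorem rank_teams_advanced_spec : Claim_equal_rank_teams_advanced := by
  intro ts order _ _
  unfold Spec_rank_teams_advanced rank_teams_advanced rank_teams_advanced_alt
  by_cases hts : ts.isEmpty
  · rw [if_pos hts]
    have : ts = [] := List.isEmpty_iff.mp hts
    subst this
    rfl
  · rw [if_neg hts]
    show ((order.reverse.foldl pvSortPass (PySem.Dict.ofList ts).items).zipIdx.foldl (pvRankStepA order) ([], 1, none)).1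
      = ((PySem.List.sorted (PySem.Dict.ofList ts).items (pvCombo order) false).zipIdx.foldl (pvRankStepB order) ([], 1, none)).1
    rw [pv_phases]
    exact pv_rank_loops order _
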